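-- pv_equiv track=rewrite | github.com/hieutran-novobi/python_foundation_exercise | Part1_Function/function.py | filter_integer_division
-- ===== SOURCE A (Python) =====
-- def filter_integer_division(lst: list, n: int) -> list:
--     '''
--     A function that accept two parameters: a list of integers **lst** and an integer **n**
--     and return the list of lists where each list stores elements that have the same remainder after the division with n
--     '''
--     remainder_dict = {}
--     for num in lst:
--         remainder = num % n
--         if remainder in remainder_dict:
--             remainder_dict[remainder].append(num)
--         else:
--             remainder_dict[remainder] = [num]
--     return list(remainder_dict.values())
-- ===== SOURCE B (Python) =====
-- def filter_integer_division(lst: list, n: int) -> list: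
--     '''
--     Two-phase re-implementation: first record the distinct remainders in
--     first-appearance order, then build each group by one filter pass over lst.
--     '''
--     seen = set()
--     order = []
--     for x in lst:
--         r = x % n
--         if r in seen:
--             pass
--         else:
--             seen.add(r)
--             order.append(r)
--     return [[x for x in lst if x % n == r] for r in order]
-- ===== Notes on version B (the rewrite author's own statement) =====
-- stated objective: alternative
-- what changed: Replaced the dict-of-growing-lists accumulation by a two-phase scheme: one pass collects the distinct remainders in first-appearance order, then each group is produced by an independent filter pass over the input.
import Mathlib
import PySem

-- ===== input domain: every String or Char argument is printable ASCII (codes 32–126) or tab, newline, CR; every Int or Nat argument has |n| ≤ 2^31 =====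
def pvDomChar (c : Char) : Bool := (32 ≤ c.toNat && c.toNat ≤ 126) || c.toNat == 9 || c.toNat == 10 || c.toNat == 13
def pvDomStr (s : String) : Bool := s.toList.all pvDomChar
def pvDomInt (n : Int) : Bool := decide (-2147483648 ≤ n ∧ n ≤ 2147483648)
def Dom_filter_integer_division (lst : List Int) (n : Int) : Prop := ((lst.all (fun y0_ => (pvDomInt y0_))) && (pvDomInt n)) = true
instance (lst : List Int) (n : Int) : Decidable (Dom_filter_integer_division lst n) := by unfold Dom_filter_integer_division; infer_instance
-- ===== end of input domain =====

-- B replaces A's dict-of-growing-lists grouping by a two-phase scheme (distinct remainders first, then one filter per group); same results, alternative structure.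


-- ===== PORT A =====
-- the loop body: 'remainder = num % n; if remainder in d: d[remainder].append(num) else: d[remainder] = [num]'
def fidStepA (n : Int) (d : PySem.Dict Int (List Int)) (num : Int) : PySem.Dict Int (List Int) :=
  let remainder := PySem.Int.mod num n
  if d.contains remainder then d.insert remainder (d.getD remainder [] ++ [num])
  else d.insert remainder [num]

def filter_integer_division (lst : List Int) (n : Int) : List (List Int) :=
  (lst.foldl (fidStepA n) PySem.Dict.empty).values

-- ===== PORT B =====
-- first pass: 'r = x % n; if r in seen: pass else: seen.add(r); order.append(r)'
def fidStepB (n : Int) (p : PySem.Set Int × List Int) (x : Int) : PySem.Set Int × List Int :=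
  let r := PySem.Int.mod x n
  if PySem.Set.contains p.1 r then p
  else (PySem.Set.add p.1 r, p.2 ++ [r])

def filter_integer_division_alt (lst : List Int) (n : Int) : List (List Int) :=
  let so := lst.foldl (fidStepB n) (PySem.Set.empty, [])
  so.2.map (fun r => lst.filter (fun x => PySem.Int.mod x n == r))

-- ===== PRECONDITION & SPEC =====
-- Pre_ excludes exactly the inputs where Python A raises ZeroDivisionError: n = 0 with a nonempty list.
def Pre_filter_integer_division (lst : List Int) (n : Int) : Prop := n ≠ 0 ∨ lst = []
instance (lst : List Int) (n : Int) : Decidable (Pre_filter_integer_division lst n) := by unfold Pre_filter_integer_division; infer_instance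
def pvWitness_filter_integer_division : List Int × Int := ([3, 5, 8, -2], 3)

def Spec_filter_integer_division (lst : List Int) (n : Int) (out : List (List Int)) : Prop := out = filter_integer_division_alt lst n
instance (lst : List Int) (n : Int) (out : List (List Int)) : Decidable (Spec_filter_integer_division lst n out) := by unfold Spec_filter_integer_division; infer_instance

-- ===== CLAIM (what is proved, stated in full; the proofs are below) =====
def Claim_equal_filter_integer_division : Prop := ∀ (lst : List Int) (n : Int), Dom_filter_integer_division lst n → Pre_filter_integer_division lst n → Spec_filter_integer_division lst n (filter_integer_division lst n)

-- ===== LEMMAS AND PROOFS =====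

-- A's fold: the value stored at key c is the prefix's members with remainder c (appended to whatever was there).
theorem fid_A_getD (n : Int) (lst : List Int) (d : PySem.Dict Int (List Int)) (c : Int) :
    (lst.foldl (fidStepA n) d).getD c [] = d.getD c [] ++ lst.filter (fun x => PySem.Int.mod x n == c) := by
  induction lst generalizing d with
  | nil => simp
  | cons x xs ih =>
    simp only [List.foldl_cons, List.filter_cons, ih]
    have hstep : (fidStepA n d x).getD c [] =
        d.getD c [] ++ (if (PySem.Int.mod x n == c) = true then [x] else []) := by
      unfold fidStepA
      by_cases hc : d.contains (PySem.Int.mod x n) = true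
      · rw [if_pos hc, PySem.Dict.getD_insert]
        by_cases hrc : c = PySem.Int.mod x n
        · subst hrc; simp
        · have hbc : (PySem.Int.mod x n == c) = false := by
            simp; exact fun h => hrc h.symm
          simp [hbc, hrc]
      · rw [if_neg hc, PySem.Dict.getD_insert]
        by_cases hrc : c = PySem.Int.mod x n
        · subst hrc
          rw [PySem.Dict.getD_of_not_contains _ _ (by simpa using hc)]
          simp
        · have hbc : (PySem.Int.mod x n == c) = false := by
            simp; exact fun h => hrc h.symm
          simp [hbc, hrc]
    rw [hstep, List.append_assoc]
    by_cases h : (PySem.Int.mod x n == c) = true <;> simp [h]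

-- A's fold: the key list is d.keys updated (as a Python set) with the remainders, so its order is first appearance.
theorem fid_A_keys (n : Int) (lst : List Int) (d : PySem.Dict Int (List Int)) :
    (lst.foldl (fidStepA n) d).keys = PySem.Set.update d.keys (lst.map (fun x => PySem.Int.mod x n)) := by
  induction lst generalizing d with
  | nil => simp [PySem.Set.update_nil]
  | cons x xs ih =>
    simp only [List.foldl_cons, List.map_cons, PySem.Set.update_cons, ih]
    congr 1
    unfold fidStepA
    by_cases hc : d.contains (PySem.Int.mod x n) = true
    · rw [if_pos hc, PySem.Dict.keys_insert_of_contains _ _ hc,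
        PySem.Set.add_of_mem ((PySem.Dict.contains_iff_mem_keys _ _).mp hc)]
    · rw [if_neg hc, PySem.Dict.keys_insert_of_not_contains _ _ (by simpa using hc),
        PySem.Set.add_of_not_mem]
      intro hmem
      exact absurd ((PySem.Dict.contains_iff_mem_keys _ _).mpr hmem) (by simpa using hc)

-- B's first pass keeps 'seen' and 'order' equal as lists, both being the set-update of the remainders.
theorem fid_B_pair (n : Int) (lst : List Int) (s : PySem.Set Int) :
    lst.foldl (fidStepB n) (s, s) =
      (PySem.Set.update s (lst.map (fun x => PySem.Int.mod x n)),
       PySem.Set.update s (lst.map (fun x => PySem.Int.mod x n))) := by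
  induction lst generalizing s with
  | nil => simp [PySem.Set.update_nil]
  | cons x xs ih =>
    simp only [List.foldl_cons, List.map_cons, PySem.Set.update_cons]
    have hstep : fidStepB n (s, s) x = (PySem.Set.add s (PySem.Int.mod x n), PySem.Set.add s (PySem.Int.mod x n)) := by
      unfold fidStepB
      by_cases hc : PySem.Set.contains s (PySem.Int.mod x n) = true
      · rw [if_pos hc, PySem.Set.add_of_mem ((PySem.Set.contains_iff _ _).mp hc)]
      · simp only [hc, Bool.false_eq_true, if_neg, not_false_iff]
        rw [PySem.Set.add_of_not_mem (fun h => hc ((PySem.Set.contains_iff _ _).mpr h))]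
    rw [hstep, ih]

theorem filter_integer_division_spec : Claim_equal_filter_integer_division := by
  intro lst n _ _
  unfold Spec_filter_integer_division filter_integer_division filter_integer_division_alt
  have hkeys := fid_A_keys n lst PySem.Dict.empty
  have hnodup : (lst.foldl (fidStepA n) PySem.Dict.empty).keys.Nodup := by
    rw [hkeys]; simp only [PySem.Dict.keys_empty, PySem.Set.update_nil_left]
    exact PySem.Set.nodup_ofList _
  rw [PySem.Dict.values_eq_map_keys _ hnodup ([] : List Int), hkeys]
  have hb := fid_B_pair n lst PySem.Set.empty
  simp only [PySem.Set.empty] at hb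
  simp only [PySem.Dict.keys_empty, show (PySem.Set.empty : PySem.Set Int) = [] from rfl, hb]
  apply List.map_congr_left
  intro c _
  rw [fid_A_getD]
  simp
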